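-- pv_equiv track=rewrite | github.com/vigneshsabapathi/python-algorithms | ciphers/porta_cipher_optimized.py | encrypt_v3
-- ===== SOURCE A (Python) =====
-- ALPHABET: dict[str, tuple[str, str]] = {
--     "A": ("ABCDEFGHIJKLM", "NOPQRSTUVWXYZ"),
--     "B": ("ABCDEFGHIJKLM", "NOPQRSTUVWXYZ"),
--     "C": ("ABCDEFGHIJKLM", "ZNOPQRSTUVWXY"),
--     "D": ("ABCDEFGHIJKLM", "ZNOPQRSTUVWXY"),
--     "E": ("ABCDEFGHIJKLM", "YZNOPQRSTUVWX"),
--     "F": ("ABCDEFGHIJKLM", "YZNOPQRSTUVWX"),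
--     "G": ("ABCDEFGHIJKLM", "XYZNOPQRSTUVW"),
--     "H": ("ABCDEFGHIJKLM", "XYZNOPQRSTUVW"),
--     "I": ("ABCDEFGHIJKLM", "WXYZNOPQRSTUV"),
--     "J": ("ABCDEFGHIJKLM", "WXYZNOPQRSTUV"),
--     "K": ("ABCDEFGHIJKLM", "VWXYZNOPQRSTU"),
--     "L": ("ABCDEFGHIJKLM", "VWXYZNOPQRSTU"),
--     "M": ("ABCDEFGHIJKLM", "UVWXYZNOPQRST"),
--     "N": ("ABCDEFGHIJKLM", "UVWXYZNOPQRST"),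
--     "O": ("ABCDEFGHIJKLM", "TUVWXYZNOPQRS"),
--     "P": ("ABCDEFGHIJKLM", "TUVWXYZNOPQRS"),
--     "Q": ("ABCDEFGHIJKLM", "STUVWXYZNOPQR"),
--     "R": ("ABCDEFGHIJKLM", "STUVWXYZNOPQR"),
--     "S": ("ABCDEFGHIJKLM", "RSTUVWXYZNOPQ"),
--     "T": ("ABCDEFGHIJKLM", "RSTUVWXYZNOPQ"),
--     "U": ("ABCDEFGHIJKLM", "QRSTUVWXYZNOP"),
--     "V": ("ABCDEFGHIJKLM", "QRSTUVWXYZNOP"),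
--     "W": ("ABCDEFGHIJKLM", "PQRSTUVWXYZNO"),
--     "X": ("ABCDEFGHIJKLM", "PQRSTUVWXYZNO"),
--     "Y": ("ABCDEFGHIJKLM", "OPQRSTUVWXYZN"),
--     "Z": ("ABCDEFGHIJKLM", "OPQRSTUVWXYZN"),
-- }
--
-- def encrypt_v3(key: str, text: str) -> str:
--     table = [ALPHABET[c] for c in key.upper()]
--     all_maps = []
--     for t in table:
--         combined = t[0] + t[1]  # 26 chars
--         forward = {combined[i]: combined[(i + 13) % 26] for i in range(26)}
--         all_maps.append(forward)
--     klen = len(all_maps)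
--     return "".join(all_maps[i % klen].get(c, c) for i, c in enumerate(text.upper()))
-- ===== SOURCE B (Python) =====
-- def encrypt_v3(key: str, text: str) -> str:
--     # Closed-form Porta map: shift from key char, arithmetic on char codes.
--     shifts = [(ord(c) - 65) // 2 for c in key.upper()]
--     out = []
--     for i, ch in enumerate(text.upper()):
--         s = shifts[i % len(shifts)]
--         o = ord(ch)
--         if 65 <= o <= 77:
--             out.append(chr(78 + (o - 65 - s) % 13))
--         elif 78 <= o <= 90:
--             out.append(chr(65 + (o - 78 + s) % 13))
--         else:
--             out.append(ch)
--     return "".join(out)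
-- ===== Notes on version B (the rewrite author's own statement) =====
-- stated objective: faster
-- what changed: Replaces the per-key-letter 26-entry substitution dictionaries and per-character dict lookups with a closed-form arithmetic Porta map: one integer shift per key character and modular arithmetic on character codes.
import Mathlib
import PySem

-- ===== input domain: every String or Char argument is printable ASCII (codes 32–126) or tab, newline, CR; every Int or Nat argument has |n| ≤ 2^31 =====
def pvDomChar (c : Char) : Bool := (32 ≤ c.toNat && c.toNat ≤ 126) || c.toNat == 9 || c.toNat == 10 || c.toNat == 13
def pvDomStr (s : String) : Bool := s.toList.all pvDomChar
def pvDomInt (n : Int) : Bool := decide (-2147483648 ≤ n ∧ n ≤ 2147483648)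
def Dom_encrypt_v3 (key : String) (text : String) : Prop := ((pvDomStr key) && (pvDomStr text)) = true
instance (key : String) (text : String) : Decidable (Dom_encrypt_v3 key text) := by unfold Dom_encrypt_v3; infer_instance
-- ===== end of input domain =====

-- B replaces A's per-key substitution dictionaries by the closed-form Porta arithmetic on
-- character codes (objective: faster, measured; no argument is mutated).

-- ===== PORT A =====
-- ALPHABET, values as (List Char × List Char) (Python 13-char strings, ported as char lists so the kernel can compute)
def pvALPHABET : PySem.Dict Char (List Char × List Char) := PySem.Dict.ofList
  [ ('A', ("ABCDEFGHIJKLM".toList, "NOPQRSTUVWXYZ".toList)),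
    ('B', ("ABCDEFGHIJKLM".toList, "NOPQRSTUVWXYZ".toList)),
    ('C', ("ABCDEFGHIJKLM".toList, "ZNOPQRSTUVWXY".toList)),
    ('D', ("ABCDEFGHIJKLM".toList, "ZNOPQRSTUVWXY".toList)),
    ('E', ("ABCDEFGHIJKLM".toList, "YZNOPQRSTUVWX".toList)),
    ('F', ("ABCDEFGHIJKLM".toList, "YZNOPQRSTUVWX".toList)),
    ('G', ("ABCDEFGHIJKLM".toList, "XYZNOPQRSTUVW".toList)),
    ('H', ("ABCDEFGHIJKLM".toList, "XYZNOPQRSTUVW".toList)),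
    ('I', ("ABCDEFGHIJKLM".toList, "WXYZNOPQRSTUV".toList)),
    ('J', ("ABCDEFGHIJKLM".toList, "WXYZNOPQRSTUV".toList)),
    ('K', ("ABCDEFGHIJKLM".toList, "VWXYZNOPQRSTU".toList)),
    ('L', ("ABCDEFGHIJKLM".toList, "VWXYZNOPQRSTU".toList)),
    ('M', ("ABCDEFGHIJKLM".toList, "UVWXYZNOPQRST".toList)),
    ('N', ("ABCDEFGHIJKLM".toList, "UVWXYZNOPQRST".toList)),
    ('O', ("ABCDEFGHIJKLM".toList, "TUVWXYZNOPQRS".toList)),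
    ('P', ("ABCDEFGHIJKLM".toList, "TUVWXYZNOPQRS".toList)),
    ('Q', ("ABCDEFGHIJKLM".toList, "STUVWXYZNOPQR".toList)),
    ('R', ("ABCDEFGHIJKLM".toList, "STUVWXYZNOPQR".toList)),
    ('S', ("ABCDEFGHIJKLM".toList, "RSTUVWXYZNOPQ".toList)),
    ('T', ("ABCDEFGHIJKLM".toList, "RSTUVWXYZNOPQ".toList)),
    ('U', ("ABCDEFGHIJKLM".toList, "QRSTUVWXYZNOP".toList)),
    ('V', ("ABCDEFGHIJKLM".toList, "QRSTUVWXYZNOP".toList)),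
    ('W', ("ABCDEFGHIJKLM".toList, "PQRSTUVWXYZNO".toList)),
    ('X', ("ABCDEFGHIJKLM".toList, "PQRSTUVWXYZNO".toList)),
    ('Y', ("ABCDEFGHIJKLM".toList, "OPQRSTUVWXYZN".toList)),
    ('Z', ("ABCDEFGHIJKLM".toList, "OPQRSTUVWXYZN".toList)) ]

-- the dict comprehension {combined[i]: combined[(i+13)%26] for i in range(26)}
def pvForward (t : List Char × List Char) : PySem.Dict Char Char :=
  let combined := t.1 ++ t.2
  (PySem.List.pyRange 0 26 1).foldl
    (fun d i => d.insert (PySem.List.pyGetD combined i ' ')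
                         (PySem.List.pyGetD combined (PySem.Int.mod (i + 13) 26) ' ')) PySem.Dict.empty

def encrypt_v3 (key : String) (text : String) : String :=
  -- ALPHABET[c] raises KeyError on a non-letter key char: Pre_ excludes that, the default here is junk
  let table := (PySem.Str.upper key).toList.map (fun c => pvALPHABET.getD c ([], []))
  let all_maps := table.map pvForward
  let klen := all_maps.length
  -- i % klen with klen = 0 raises ZeroDivisionError in Python: Pre_ excludes that case
  String.mk ((PySem.List.enumerate (PySem.Str.upper text).toList 0).map
    (fun p => (PySem.List.pyGetD all_maps (PySem.Int.mod p.1 (klen : Int)) PySem.Dict.empty).getD p.2 p.2))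

-- ===== PORT B =====
def pvShift (c : Char) : Int := PySem.Int.floordiv ((c.toNat : Int) - 65) 2

def pvPortaChar (s : Int) (ch : Char) : Char :=
  let o : Int := (ch.toNat : Int)
  if 65 ≤ o ∧ o ≤ 77 then Char.ofNat (78 + PySem.Int.mod (o - 65 - s) 13).toNat
  else if 78 ≤ o ∧ o ≤ 90 then Char.ofNat (65 + PySem.Int.mod (o - 78 + s) 13).toNat
  else ch

def encrypt_v3_alt (key : String) (text : String) : String :=
  let shifts := (PySem.Str.upper key).toList.map pvShift
  String.mk ((PySem.List.enumerate (PySem.Str.upper text).toList 0).map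
    (fun p => pvPortaChar (PySem.List.pyGetD shifts (PySem.Int.mod p.1 (shifts.length : Int)) 0) p.2))

-- ===== PRECONDITION & SPEC =====
-- Pre_ excludes exactly the inputs where A raises: a non-letter character in key (KeyError in
-- ALPHABET[c]) and an empty key with nonempty text (ZeroDivisionError in i % len).
def Pre_encrypt_v3 (key : String) (text : String) : Prop :=
  (key.toList.all (fun c => (('A' ≤ c && c ≤ 'Z') || ('a' ≤ c && c ≤ 'z'))) = true)
  ∧ (key ≠ "" ∨ text = "")
instance (key : String) (text : String) : Decidable (Pre_encrypt_v3 key text) := by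
  unfold Pre_encrypt_v3; infer_instance

def pvWitness_encrypt_v3 : String × String := ("Key", "Hello, World!")

def Spec_encrypt_v3 (key : String) (text : String) (out : String) : Prop := out = encrypt_v3_alt key text
instance (key : String) (text : String) (out : String) : Decidable (Spec_encrypt_v3 key text out) := by unfold Spec_encrypt_v3; infer_instance

-- ===== CLAIM (what is proved, stated in full; the proofs are below) =====
def Claim_equal_encrypt_v3 : Prop := ∀ (key : String) (text : String), Dom_encrypt_v3 key text → Pre_encrypt_v3 key text → Spec_encrypt_v3 key text (encrypt_v3 key text)

-- ===== LEMMAS AND PROOFS =====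

-- proof-only helper: the ALPHABET row for the key letter with shift k (letters 2k and 2k+1 share it)
def pvRow (k : Nat) : List Char × List Char := pvALPHABET.getD (Char.ofNat (65 + 2 * k)) ([], [])

set_option maxHeartbeats 1000000 in
set_option maxRecDepth 10000 in
lemma pv_row_lookup : ∀ u < 26, pvALPHABET.getD (Char.ofNat (65 + u)) ([], []) = pvRow (u / 2) := by
  decide

set_option maxHeartbeats 3000000 in
set_option maxRecDepth 100000 in
lemma pv_letter_bool : ((List.range 13).all fun k => (List.range 26).all fun m =>
    (pvForward (pvRow k)).getD (Char.ofNat (65 + m)) (Char.ofNat (65 + m))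
      == pvPortaChar (k : Int) (Char.ofNat (65 + m))) = true := by rfl

-- the per-character heart, letter case: A's dict lookup equals B's arithmetic map
lemma pv_letter : ∀ k < 13, ∀ m < 26,
    (pvForward (pvRow k)).getD (Char.ofNat (65 + m)) (Char.ofNat (65 + m))
      = pvPortaChar (k : Int) (Char.ofNat (65 + m)) := by
  have h := pv_letter_bool
  simp only [List.all_eq_true, List.mem_range, beq_iff_eq] at h
  exact h

set_option maxHeartbeats 1000000 in
set_option maxRecDepth 100000 in
lemma pv_keys_bool : ((List.range 13).all fun k =>
    (pvForward (pvRow k)).keys.all fun c => 65 ≤ c.toNat && c.toNat ≤ 90) = true := by rfl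

lemma pv_keys : ∀ k < 13, ∀ c ∈ (pvForward (pvRow k)).keys, 65 ≤ c.toNat ∧ c.toNat ≤ 90 := by
  have h := pv_keys_bool
  simp only [List.all_eq_true, List.mem_range, Bool.and_eq_true, decide_eq_true_eq] at h
  exact h

-- non-letter text char: the dict has only the 26 upper-case letters as keys, so .get(c, c) = c
lemma pv_other (k : Nat) (hk : k < 13) (ch : Char) (hch : ¬ (65 ≤ ch.toNat ∧ ch.toNat ≤ 90)) :
    (pvForward (pvRow k)).getD ch ch = ch := by
  apply PySem.Dict.getD_of_not_contains
  rw [PySem.Dict.contains_eq_decide_mem_keys]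
  simp only [decide_eq_false_iff_not]
  intro hmem
  exact hch (pv_keys k hk ch hmem)

lemma pvPortaChar_other (s : Int) (ch : Char) (hch : ¬ (65 ≤ ch.toNat ∧ ch.toNat ≤ 90)) :
    pvPortaChar s ch = ch := by
  simp only [pvPortaChar]
  rw [if_neg, if_neg] <;> omega

lemma pv_char_bounds {c : Char}
    (h : (('A' ≤ c && c ≤ 'Z') || ('a' ≤ c && c ≤ 'z')) = true) :
    (65 ≤ c.toNat ∧ c.toNat ≤ 90) ∨ (97 ≤ c.toNat ∧ c.toNat ≤ 122) := by
  simp only [Bool.or_eq_true, Bool.and_eq_true, decide_eq_true_eq, Char.le_def,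
    UInt32.le_iff_toNat_le] at h
  exact h

lemma pv_upperChar_lower {c : Char} (h1 : 97 ≤ c.toNat) (h2 : c.toNat ≤ 122) :
    (PySem.Chars.upperChar c).toNat = c.toNat - 32 := by
  simp only [PySem.Chars.upperChar, PySem.Chars.islower]
  rw [if_pos]
  · rw [Char.toNat_ofNat, if_pos (Or.inl (by omega))]
  · simp only [Bool.and_eq_true, decide_eq_true_eq, Char.le_def, UInt32.le_iff_toNat_le]
    exact ⟨h1, h2⟩

lemma pv_upperChar_self {c : Char} (h : ¬ (97 ≤ c.toNat ∧ c.toNat ≤ 122)) :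
    PySem.Chars.upperChar c = c := by
  simp only [PySem.Chars.upperChar, PySem.Chars.islower]
  rw [if_neg]
  simp only [Bool.and_eq_true, decide_eq_true_eq, Char.le_def, UInt32.le_iff_toNat_le]
  exact fun ⟨a, b⟩ => h ⟨a, b⟩

lemma pv_upper_letter {c : Char}
    (h : (('A' ≤ c && c ≤ 'Z') || ('a' ≤ c && c ≤ 'z')) = true) :
    65 ≤ (PySem.Chars.upperChar c).toNat ∧ (PySem.Chars.upperChar c).toNat < 91 := by
  rcases pv_char_bounds h with hU | hL
  · rw [pv_upperChar_self (by omega)]; omega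
  · rw [pv_upperChar_lower hL.1 hL.2]; omega

lemma pv_upper_ascii {c : Char} (h : c.toNat < 128) :
    (PySem.Chars.upperChar c).toNat < 128 := by
  by_cases hl : 97 ≤ c.toNat ∧ c.toNat ≤ 122
  · rw [pv_upperChar_lower hl.1 hl.2]; omega
  · rw [pv_upperChar_self hl]; exact h

lemma pv_shift_eq {c : Char} {u : Nat} (hc : c.toNat = 65 + u) :
    pvShift c = ((u / 2 : Nat) : Int) := by
  simp only [pvShift, hc]
  rw [PySem.Int.floordiv_eq_ediv_of_pos (by norm_num)]
  omega

-- ===== VERDICT (by name: the statement is the Claim_ definition above) =====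
set_option maxHeartbeats 1600000 in
set_option maxRecDepth 10000 in
theorem encrypt_v3_spec : Claim_equal_encrypt_v3 := by
  intro key text hdom hpre
  unfold Spec_encrypt_v3
  obtain ⟨hkey, hkt⟩ := hpre
  simp only [Dom_encrypt_v3, Bool.and_eq_true, pvDomStr] at hdom
  rcases hkt with hkne | htxt
  · -- key nonempty: pointwise equality of the two character maps
    simp only [encrypt_v3, encrypt_v3_alt, PySem.Str.toList_upper, PySem.Chars.upper,
      List.map_map, List.length_map]
    apply congrArg String.mk
    apply List.map_congr_left
    intro p hp
    rw [PySem.List.mem_enumerate_iff] at hp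
    obtain ⟨j, hj, rfl⟩ := hp
    simp only [List.length_map] at hj
    simp only [zero_add]
    have hK0 : 0 < key.toList.length := by
      rcases Nat.eq_zero_or_pos key.toList.length with h0 | h
      · exact absurd (String.toList_eq_nil_iff.mp (List.eq_nil_of_length_eq_zero h0)) hkne
      · exact h
    rw [PySem.Int.mod_natCast, PySem.List.pyGetD_natCast, PySem.List.pyGetD_natCast]
    set jk := j % key.toList.length with hjk
    have hjklt : jk < key.toList.length := Nat.mod_lt _ hK0
    rw [List.getD_eq_getElem _ _ (by simpa using hjklt),
        List.getD_eq_getElem _ _ (by simpa using hjklt)]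
    simp only [List.getElem_map, Function.comp_apply]
    -- the key character at jk is an upper-case letter
    have hletter : ∀ c ∈ key.toList, (('A' ≤ c && c ≤ 'Z') || ('a' ≤ c && c ≤ 'z')) = true := by
      simpa only [List.all_eq_true] using hkey
    obtain ⟨hlo, hhi⟩ := pv_upper_letter (hletter _ (List.getElem_mem hjklt))
    set kc := PySem.Chars.upperChar key.toList[jk] with hkc
    have hu : kc.toNat = 65 + (kc.toNat - 65) := by omega
    have hulT : kc.toNat - 65 < 26 := by omega
    have hkcofNat : Char.ofNat (65 + (kc.toNat - 65)) = kc := by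
      rw [← hu, Char.ofNat_toNat]
    rw [← hkcofNat, pv_row_lookup _ hulT,
        pv_shift_eq (c := Char.ofNat (65 + (kc.toNat - 65))) (u := kc.toNat - 65)
          (by rw [hkcofNat, ← hu])]
    -- the text character is ASCII
    have hdomc : pvDomChar text.toList[j] = true :=
      List.all_eq_true.mp hdom.2 _ (List.getElem_mem hj)
    have hasc : (PySem.Chars.upperChar text.toList[j]).toNat < 128 := by
      apply pv_upper_ascii
      simp only [pvDomChar, Bool.or_eq_true, Bool.and_eq_true, decide_eq_true_eq,
        beq_iff_eq] at hdomc
      omega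
    set tc := PySem.Chars.upperChar text.toList[j] with htc
    by_cases hzone : 65 ≤ tc.toNat ∧ tc.toNat ≤ 90
    · have hm : tc.toNat - 65 < 26 := by omega
      have htcof : Char.ofNat (65 + (tc.toNat - 65)) = tc := by
        rw [(by omega : 65 + (tc.toNat - 65) = tc.toNat), Char.ofNat_toNat]
      rw [← htcof]
      exact pv_letter _ (by omega) _ hm
    · rw [pv_other _ (by omega) _ hzone, pvPortaChar_other _ _ hzone]
  · -- text empty: both sides are the empty string
    subst htxt
    simp only [encrypt_v3, encrypt_v3_alt]
    rw [PySem.Str.toList_upper]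
    simp [PySem.Chars.upper]
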